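-- pv_equiv track=rewrite | github.com/darvenommm/algorithmes_exam | practice/52.py | sorted_strings_by_hash
-- ===== SOURCE A (Python) =====
-- def polynomial_hash(string: str, p: int) -> int:
--     result = 0
--     power = 0
--
--     for char in string:
--         result += p**power * ord(char)
--         power += 1
--
--     return result
--
-- def sorted_strings_by_hash(strings: list[str]) -> list[str]:
--     cache: dict[int, list[str]] = {}
--     result: list[str] = []
--
--     for string in strings:
--         string_hash = polynomial_hash(string, 3)
--         cache[string_hash] = cache.get(string_hash, []) + [string]
--
--     for string_hash in sorted(cache.keys()):
--         result.extend(cache[string_hash])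
--
--     return result
-- ===== SOURCE B (Python) =====
-- def polynomial_hash(string: str, p: int) -> int:
--     result = 0
--     power = 0
--
--     for char in string:
--         result += p**power * ord(char)
--         power += 1
--
--     return result
--
--
-- def sorted_strings_by_hash(strings: list[str]) -> list[str]:
--     return sorted(strings, key=lambda s: polynomial_hash(s, 3))
-- ===== Notes on version B (the rewrite author's own statement) =====
-- stated objective: faster
-- what changed: Replaced the hash-keyed bucket dict (each bucket rebuilt by whole-list concatenation per element) plus the sorted-keys concatenation pass with a single stable keyed sort keyed by polynomial_hash(s, 3); the stable sort reproduces A's original-order ties among equal hashes.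
import Mathlib
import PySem

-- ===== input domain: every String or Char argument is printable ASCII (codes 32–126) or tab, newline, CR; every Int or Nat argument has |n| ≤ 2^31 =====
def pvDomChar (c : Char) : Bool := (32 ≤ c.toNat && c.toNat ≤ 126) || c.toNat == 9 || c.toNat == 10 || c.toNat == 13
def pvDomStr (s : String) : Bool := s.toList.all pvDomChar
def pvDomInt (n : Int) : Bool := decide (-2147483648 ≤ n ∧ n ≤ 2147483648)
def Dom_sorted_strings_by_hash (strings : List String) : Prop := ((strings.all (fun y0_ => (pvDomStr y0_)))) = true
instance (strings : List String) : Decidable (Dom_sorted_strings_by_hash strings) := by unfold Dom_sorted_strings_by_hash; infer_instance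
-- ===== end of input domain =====

-- B replaces A's hash-keyed bucket dict + sorted-keys concatenation by one stable keyed sort (idiomatic; same result, ties included).

-- ===== PORT A =====
-- shared helper of both Pythons: polynomial_hash(string, p); the power counter is always ≥ 0, tracked as Nat
def polynomial_hash (string : String) (p : Int) : Int :=
  (string.toList.foldl (fun (st : Int × Nat) char => (st.1 + p ^ st.2 * (char.toNat : Int), st.2 + 1)) (0, 0)).1

def sorted_strings_by_hash (strings : List String) : List String :=
  let cache : PySem.Dict Int (List String) :=
    strings.foldl (fun cache string =>
      cache.insert (polynomial_hash string 3) (cache.getD (polynomial_hash string 3) [] ++ [string]))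
      PySem.Dict.empty
  -- cache[string_hash]: the key is always present (it comes from cache.keys), so getD [] is exact here
  (PySem.List.sorted cache.keys (fun k => k)).foldl
    (fun result string_hash => result ++ cache.getD string_hash []) []

-- ===== PORT B =====
def sorted_strings_by_hash_alt (strings : List String) : List String :=
  PySem.List.sorted strings (fun s => polynomial_hash s 3)

-- ===== PRECONDITION & SPEC =====
def Spec_sorted_strings_by_hash (strings : List String) (out : List String) : Prop := out = sorted_strings_by_hash_alt strings
instance (strings : List String) (out : List String) : Decidable (Spec_sorted_strings_by_hash strings out) := by unfold Spec_sorted_strings_by_hash; infer_instance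

-- ===== CLAIM (what is proved, stated in full; the proofs are below) =====
def Claim_equal_sorted_strings_by_hash : Prop := ∀ (strings : List String), Dom_sorted_strings_by_hash strings → Spec_sorted_strings_by_hash strings (sorted_strings_by_hash strings)

-- ===== LEMMAS AND PROOFS =====

lemma pv_cache_getD (strings : List String) (k : Int) :
    (strings.foldl (fun cache string =>
        cache.insert (polynomial_hash string 3) (cache.getD (polynomial_hash string 3) [] ++ [string]))
        PySem.Dict.empty).getD k []
      = strings.filter (fun s => polynomial_hash s 3 == k) := by
  have h1 : (strings.foldl (fun cache string =>
        cache.insert (polynomial_hash string 3) (cache.getD (polynomial_hash string 3) [] ++ [string]))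
        (PySem.Dict.empty : PySem.Dict Int (List String)))
      = (strings.map (fun s => (polynomial_hash s 3, s))).foldl
          (fun d p => d.modify p.1 [] (· ++ [p.2])) PySem.Dict.empty := by
    rw [List.foldl_map]; rfl
  rw [h1, PySem.Dict.getD_foldl_modify_append]
  simp [List.filter_map, Function.comp_def]

lemma pv_cache_keys (strings : List String) :
    (strings.foldl (fun cache string =>
        cache.insert (polynomial_hash string 3) (cache.getD (polynomial_hash string 3) [] ++ [string]))
        PySem.Dict.empty).keys
      = PySem.Set.ofList (strings.map (fun s => polynomial_hash s 3)) := by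
  rw [PySem.Dict.keys_foldl_insert_key strings (fun s => polynomial_hash s 3)
    (fun cache string => cache.getD (polynomial_hash string 3) [] ++ [string]) PySem.Dict.empty]
  rfl

lemma pv_A_eq_flat (strings : List String) :
    sorted_strings_by_hash strings
      = (PySem.List.sorted (PySem.Set.ofList (strings.map (fun s => polynomial_hash s 3))) (fun k => k)).flatMap
          (fun k => strings.filter (fun s => polynomial_hash s 3 == k)) := by
  unfold sorted_strings_by_hash
  rw [PySem.List.foldl_append_eq_flatMap, pv_cache_keys]
  rw [List.nil_append]
  exact List.flatMap_congr (fun k _ => pv_cache_getD strings k)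

lemma pv_sorted_append_singleton {α : Type} (key : α → Int) (xs : List α) (x : α) :
    PySem.List.sorted (xs ++ [x]) key
      = PySem.List.insertBy (fun a b => decide (key a < key b)) x (PySem.List.sorted xs key) := by
  rw [PySem.List.sorted_eq_foldl_insertBy, PySem.List.sorted_eq_foldl_insertBy, List.foldl_append]
  rfl

lemma pv_flatMap_ite_single {α : Type} (k : Int) (v : List α) :
    ∀ (K : List Int), K.Nodup → k ∈ K → K.flatMap (fun j => if j = k then v else []) = v := by
  intro K
  induction K with
  | nil => simp
  | cons j K ih =>
    intro hnd hk
    rcases List.mem_cons.mp hk with h | h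
    · subst h
      have hz : K.flatMap (fun j' => if j' = k then v else []) = [] := by
        apply List.flatMap_eq_nil_iff.mpr
        intro j' hj'
        have hne : j' ≠ k := fun e => (List.nodup_cons.mp hnd).1 (e ▸ hj')
        simp [hne]
      simp [hz]
    · have hne : j ≠ k := fun e => (List.nodup_cons.mp hnd).1 (e ▸ h)
      simp [hne, ih (List.nodup_cons.mp hnd).2 h]


lemma pv_flat_filter (strings : List String) (k : Int) :
    ((PySem.List.sorted (PySem.Set.ofList (strings.map (fun s => polynomial_hash s 3))) (fun k => k)).flatMap
        (fun j => strings.filter (fun s => polynomial_hash s 3 == j))).filter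
      (fun y => polynomial_hash y 3 == k)
      = strings.filter (fun s => polynomial_hash s 3 == k) := by
  have hperm := PySem.List.sorted_perm (PySem.Set.ofList (strings.map (fun s => polynomial_hash s 3))) (fun k : Int => k) (rev := false)
  have hnd : (PySem.List.sorted (PySem.Set.ofList (strings.map (fun s => polynomial_hash s 3))) (fun k : Int => k)).Nodup :=
    hperm.symm.nodup (PySem.Set.nodup_ofList _)
  rw [List.filter_flatMap]
  have hbucket : ∀ j : Int, (strings.filter (fun s => polynomial_hash s 3 == j)).filter (fun y => polynomial_hash y 3 == k)
      = if j = k then strings.filter (fun s => polynomial_hash s 3 == k) else [] := by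
    intro j
    by_cases hjk : j = k
    · subst hjk
      simp [List.filter_filter]
    · rw [List.filter_filter, if_neg hjk]
      apply List.filter_eq_nil_iff.mpr
      intro s _
      simp only [Bool.and_eq_true, beq_iff_eq]
      rintro ⟨h1, h2⟩
      exact hjk (h2 ▸ h1)
  rw [List.flatMap_congr (fun j _ => hbucket j)]
  by_cases hk : k ∈ strings.map (fun s => polynomial_hash s 3)
  · have hkK : k ∈ PySem.List.sorted (PySem.Set.ofList (strings.map (fun s => polynomial_hash s 3))) (fun k : Int => k) := by
      rw [PySem.List.mem_sorted]
      exact (PySem.Set.mem_ofList _ _).mpr hk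
    exact pv_flatMap_ite_single k _ _ hnd hkK
  · have h1 : strings.filter (fun s => polynomial_hash s 3 == k) = [] := by
      apply List.filter_eq_nil_iff.mpr
      intro s hs hsk
      exact hk (List.mem_map.mpr ⟨s, hs, by simpa using hsk⟩)
    rw [h1]
    apply List.flatMap_eq_nil_iff.mpr
    intro j hj
    have hjk : j ≠ k := by
      intro e; subst e
      exact hk ((PySem.Set.mem_ofList _ _).mp ((PySem.List.mem_sorted _ _ _ _).mp hj))
    simp [hjk]

lemma pv_flat_pairwise (strings : List String) :
    ((PySem.List.sorted (PySem.Set.ofList (strings.map (fun s => polynomial_hash s 3))) (fun k => k)).flatMap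
        (fun k => strings.filter (fun s => polynomial_hash s 3 == k))).Pairwise
      (fun a b => polynomial_hash a 3 ≤ polynomial_hash b 3) := by
  apply List.pairwise_flatMap.mpr
  constructor
  · intro k _
    apply List.pairwise_of_forall_mem_list
    intro a ha b hb
    have h1 : polynomial_hash a 3 = k := by simpa using (List.mem_filter.mp ha).2
    have h2 : polynomial_hash b 3 = k := by simpa using (List.mem_filter.mp hb).2
    omega
  · apply (PySem.List.sorted_ofList_pairwise_lt (strings.map (fun s => polynomial_hash s 3))).imp
    intro k1 k2 hlt x hx y hy
    have h1 : polynomial_hash x 3 = k1 := by simpa using (List.mem_filter.mp hx).2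
    have h2 : polynomial_hash y 3 = k2 := by simpa using (List.mem_filter.mp hy).2
    omega

lemma pv_filter_insertBy_neg {α : Type} (key : α → Int) (x : α) (l : List α) (k : Int)
    (hx : key x ≠ k) :
    (PySem.List.insertBy (fun a b => decide (key a < key b)) x l).filter (fun y => key y == k)
      = l.filter (fun y => key y == k) := by
  induction l with
  | nil => simp [PySem.List.insertBy, hx]
  | cons y ys ih =>
    simp only [PySem.List.insertBy]
    by_cases hc : key x < key y
    · rw [if_pos (by simpa using hc), List.filter_cons, List.filter_cons]
      simp [hx]
    · rw [if_neg (by simpa using hc), List.filter_cons, List.filter_cons, ih]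

lemma pv_filter_insertBy_pos {α : Type} (key : α → Int) (x : α) (l : List α) (k : Int)
    (hl : l.Pairwise (fun a b => key a ≤ key b)) (hx : key x = k) :
    (PySem.List.insertBy (fun a b => decide (key a < key b)) x l).filter (fun y => key y == k)
      = l.filter (fun y => key y == k) ++ [x] := by
  induction l with
  | nil => simp [PySem.List.insertBy, hx]
  | cons y ys ih =>
    rcases List.pairwise_cons.mp hl with ⟨hy, hys⟩
    simp only [PySem.List.insertBy]
    by_cases hc : key x < key y
    · have hnil : (y :: ys).filter (fun z => key z == k) = [] := by
        apply List.filter_eq_nil_iff.mpr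
        intro z hz
        have hzk : key x < key z := by
          rcases List.mem_cons.mp hz with h | h
          · exact h ▸ hc
          · exact lt_of_lt_of_le hc (hy z h)
        simp only [beq_iff_eq]
        omega
      rw [if_pos (by simpa using hc), List.filter_cons]
      simp [hx, hnil]
    · rw [if_neg (by simpa using hc), List.filter_cons, ih hys, List.filter_cons]
      by_cases hyk : (key y == k) = true <;> simp [hyk]

lemma pv_filter_sorted {α : Type} (key : α → Int) (xs : List α) (k : Int) :
    (PySem.List.sorted xs key).filter (fun y => key y == k) = xs.filter (fun y => key y == k) := by
  induction xs using List.reverseRecOn with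
  | nil => rw [PySem.List.sorted_eq_foldl_insertBy]; rfl
  | append_singleton xs x ih =>
    rw [pv_sorted_append_singleton]
    by_cases hx : key x = k
    · rw [pv_filter_insertBy_pos key x _ k (PySem.List.sorted_pairwise xs key) hx, ih,
        List.filter_append]
      simp [hx]
    · rw [pv_filter_insertBy_neg key x _ k hx, ih, List.filter_append]
      simp [hx]

lemma pv_eq_of_filters {α : Type} (key : α → Int) :
    ∀ (l₁ l₂ : List α), l₁.Pairwise (fun a b => key a ≤ key b) → l₂.Pairwise (fun a b => key a ≤ key b) →
      (∀ k : Int, l₁.filter (fun y => key y == k) = l₂.filter (fun y => key y == k)) → l₁ = l₂ := by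
  intro l₁
  induction l₁ with
  | nil =>
    intro l₂ _ _ hf
    cases l₂ with
    | nil => rfl
    | cons b t₂ =>
      have h := hf (key b)
      rw [List.filter_nil, List.filter_cons] at h
      simp at h
  | cons a t₁ ih =>
    intro l₂ h₁ h₂ hf
    cases l₂ with
    | nil =>
      have h := hf (key a)
      rw [List.filter_nil, List.filter_cons] at h
      simp at h
    | cons b t₂ =>
      rcases List.pairwise_cons.mp h₁ with ⟨ha, ht₁⟩
      rcases List.pairwise_cons.mp h₂ with ⟨hb, ht₂⟩
      have hab : key a = key b := by
        have h1 := hf (key a)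
        have hmem : ∃ c ∈ b :: t₂, key c = key a := by
          by_contra hno
          push Not at hno
          have hr : (b :: t₂).filter (fun y => key y == key a) = [] := by
            apply List.filter_eq_nil_iff.mpr
            intro c hc
            simpa using hno c hc
          rw [hr, List.filter_cons] at h1
          simp at h1
        have h2 := hf (key b)
        have hmem' : ∃ c ∈ a :: t₁, key c = key b := by
          by_contra hno
          push Not at hno
          have hr : (a :: t₁).filter (fun y => key y == key b) = [] := by
            apply List.filter_eq_nil_iff.mpr
            intro c hc
            simpa using hno c hc
          rw [hr, List.filter_cons] at h2
          simp at h2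
        obtain ⟨c, hc, hck⟩ := hmem
        obtain ⟨c', hc', hck'⟩ := hmem'
        have hbc : key b ≤ key c := by
          rcases List.mem_cons.mp hc with h | h
          · exact h ▸ le_refl _
          · exact hb c h
        have hac : key a ≤ key c' := by
          rcases List.mem_cons.mp hc' with h | h
          · exact h ▸ le_refl _
          · exact ha c' h
        omega
      have h2 := hf (key a)
      rw [List.filter_cons, List.filter_cons] at h2
      simp only [beq_self_eq_true, if_pos, hab.symm] at h2
      obtain ⟨hae, htl⟩ := List.cons.inj h2
      subst hae
      have : t₁ = t₂ := by
        apply ih t₂ ht₁ ht₂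
        intro k
        by_cases hk : key a = k
        · subst hk; exact htl
        · have h3 := hf k
          rw [List.filter_cons, List.filter_cons, if_neg (by simpa using hk),
            if_neg (by rw [beq_iff_eq, ← hab]; exact hk)] at h3
          exact h3
      rw [this]

-- ===== VERDICT (by name: the statement is the Claim_ definition above) =====
theorem sorted_strings_by_hash_spec : Claim_equal_sorted_strings_by_hash := by
  intro strings _
  unfold Spec_sorted_strings_by_hash sorted_strings_by_hash_alt
  rw [pv_A_eq_flat]
  exact pv_eq_of_filters (fun s => polynomial_hash s 3) _ _
    (pv_flat_pairwise strings)
    (PySem.List.sorted_pairwise strings (fun s => polynomial_hash s 3))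
    (fun k => by rw [pv_flat_filter, pv_filter_sorted])
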